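-- pv_equiv track=rewrite | github.com/AleksandrMolchagin/cryptography | ciphers/Caesar’s Shifty Cipher/shifty.py | create_shift_substitutions
-- ===== SOURCE A (Python) =====
-- import string
--
-- def create_shift_substitutions(n):
--     encoding = {}
--     decoding = {}
--
--     alphabet_size = len(string.ascii_uppercase)
--
--     for i in range(alphabet_size):
--         oldLetter = string.ascii_uppercase[i]
--         newLetter = string.ascii_uppercase[(i+n)%alphabet_size]
--
--         encoding[oldLetter] = newLetter
--         decoding[newLetter] = oldLetter
--
--     return encoding, decoding
-- ===== SOURCE B (Python) =====
-- import string
--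
-- def create_shift_substitutions(n):
--     r = n % 26
--     rotated = string.ascii_uppercase[r:] + string.ascii_uppercase[:r]
--     encoding = dict(zip(string.ascii_uppercase, rotated))
--     decoding = {v: k for k, v in encoding.items()}
--     return encoding, decoding
-- ===== Notes on version B (the rewrite author's own statement) =====
-- stated objective: simpler
-- what changed: Replaces the index-by-index loop that fills both dicts with modular index arithmetic by one slice-based rotation of the alphabet, dict(zip(...)) for the encoding, and a separate inversion comprehension for the decoding.
import Mathlib
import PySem

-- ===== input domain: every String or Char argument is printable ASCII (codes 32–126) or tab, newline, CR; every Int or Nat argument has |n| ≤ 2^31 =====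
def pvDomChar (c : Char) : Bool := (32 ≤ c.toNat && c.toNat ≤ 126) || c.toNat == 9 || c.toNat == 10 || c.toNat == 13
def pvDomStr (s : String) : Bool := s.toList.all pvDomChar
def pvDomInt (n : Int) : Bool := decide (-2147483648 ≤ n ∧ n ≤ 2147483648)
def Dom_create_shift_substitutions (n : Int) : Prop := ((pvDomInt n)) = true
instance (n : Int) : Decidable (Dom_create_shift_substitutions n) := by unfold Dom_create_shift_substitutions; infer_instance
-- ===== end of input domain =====

-- B rebuilds the tables once from a slice-rotated alphabet and inverts the encoding, instead of A's indexed loop filling both dicts.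

-- ===== PORT A =====
-- string.ascii_uppercase (as its character list)
def pvUpper : List Char := "ABCDEFGHIJKLMNOPQRSTUVWXYZ".toList

-- the body of A's `for i in range(alphabet_size)` loop (indexing always in range, default never used)
def pvStepA (n alphabet_size : Int)
    (st : PySem.Dict String String × PySem.Dict String String) (i : Int) :
    PySem.Dict String String × PySem.Dict String String :=
  let oldLetter := String.singleton (PySem.List.pyGetD pvUpper i 'A')
  let newLetter := String.singleton (PySem.List.pyGetD pvUpper (PySem.Int.mod (i + n) alphabet_size) 'A')
  (st.1.insert oldLetter newLetter, st.2.insert newLetter oldLetter)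

def create_shift_substitutions (n : Int) : (List (String × String)) × (List (String × String)) :=
  let alphabet_size : Int := (pvUpper.length : Int)
  let st := (PySem.List.pyRange 0 alphabet_size 1).foldl (pvStepA n alphabet_size)
      (PySem.Dict.empty, PySem.Dict.empty)
  (st.1.items, st.2.items)

-- ===== PORT B =====
def create_shift_substitutions_alt (n : Int) : (List (String × String)) × (List (String × String)) :=
  let r := PySem.Int.mod n 26
  let rotated := PySem.List.slice pvUpper (some r) none ++ PySem.List.slice pvUpper none (some r)
  let encoding := PySem.Dict.ofList
    ((pvUpper.zip rotated).map (fun p => (String.singleton p.1, String.singleton p.2)))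
  let decoding := PySem.Dict.ofList (encoding.items.map (fun p => (p.2, p.1)))
  (encoding.items, decoding.items)

-- ===== PRECONDITION & SPEC =====
def Spec_create_shift_substitutions (n : Int) (out : (List (String × String)) × (List (String × String))) : Prop := out = create_shift_substitutions_alt n
instance (n : Int) (out : (List (String × String)) × (List (String × String))) : Decidable (Spec_create_shift_substitutions n out) := by unfold Spec_create_shift_substitutions; infer_instance

-- ===== CLAIM (what is proved, stated in full; the proofs are below) =====
def Claim_equal_create_shift_substitutions : Prop := ∀ (n : Int), Dom_create_shift_substitutions n → Spec_create_shift_substitutions n (create_shift_substitutions n)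

-- ===== LEMMAS AND PROOFS =====

-- A only reads n through (i + n) % 26, which depends on n only modulo 26
lemma pvStepA_mod (n : Int) :
    pvStepA n 26 = pvStepA (PySem.Int.mod n 26) 26 := by
  funext st i
  have h : PySem.Int.mod (i + n) 26 = PySem.Int.mod (i + PySem.Int.mod n 26) 26 := by
    rw [PySem.Int.mod_eq_emod_of_pos (by norm_num),
        PySem.Int.mod_eq_emod_of_pos (by norm_num),
        PySem.Int.mod_eq_emod_of_pos (by norm_num)]
    omega
  simp only [pvStepA, h]

lemma pvA_mod (n : Int) :
    create_shift_substitutions n = create_shift_substitutions (PySem.Int.mod n 26) := by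
  simp only [create_shift_substitutions]
  have h26 : ((pvUpper.length : Nat) : Int) = 26 := by decide
  rw [h26, pvStepA_mod]

lemma pvB_mod (n : Int) :
    create_shift_substitutions_alt (PySem.Int.mod n 26) = create_shift_substitutions_alt n := by
  unfold create_shift_substitutions_alt
  have h : PySem.Int.mod (PySem.Int.mod n 26) 26 = PySem.Int.mod n 26 := by
    rw [PySem.Int.mod_eq_emod_of_pos (by norm_num),
        PySem.Int.mod_eq_emod_of_pos (by norm_num)]
    omega
  rw [h]

set_option maxHeartbeats 2000000 in
lemma pvAB_residue : ∀ (r : Int), 0 ≤ r → r < 26 →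
    create_shift_substitutions r = create_shift_substitutions_alt r := by
  intro r h0 h1
  interval_cases r <;> decide

-- ===== VERDICT (by name: the statement is the Claim_ definition above) =====
theorem create_shift_substitutions_spec : Claim_equal_create_shift_substitutions := by
  intro n _
  unfold Spec_create_shift_substitutions
  rw [pvA_mod n, ← pvB_mod n]
  exact pvAB_residue _ (PySem.Int.mod_nonneg n (by norm_num)) (PySem.Int.mod_lt n (by norm_num))
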